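-- pv_equiv track=rewrite | github.com/globus024/algorytme | lesson7/less_7_task_3.py | midle_element
-- ===== SOURCE A (Python) =====
-- def midle_element(array):
--     for f in array:
--         right_pos, left_pos = 0, 0
--         for i in array:
--             if f > i:
--                 right_pos += 1
--             else:
--                 right_pos -= 1
--         if right_pos == 1:
--             return f
-- ===== SOURCE B (Python) =====
-- def midle_element(array):
--     # sort once; the only value that can have exactly (n+1)/2 strictly-smaller
--     # elements is sorted(array)[(n+1)//2], and it qualifies iff its left
--     # neighbour in sorted order is strictly smaller.
--     n = len(array)
--     if n % 2 == 0 or n == 1: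
--         return None
--     s = sorted(array)
--     t = (n + 1) // 2
--     if s[t - 1] < s[t]:
--         return s[t]
--     return None
-- ===== Notes on version B (the rewrite author's own statement) =====
-- stated objective: faster
-- what changed: Instead of scanning all elements and counting smaller ones for each (nested loops), B sorts once and returns the element at index (n+1)//2 of the sorted list iff its left sorted neighbour is strictly smaller, since that is the only possible answer.
import Mathlib
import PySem

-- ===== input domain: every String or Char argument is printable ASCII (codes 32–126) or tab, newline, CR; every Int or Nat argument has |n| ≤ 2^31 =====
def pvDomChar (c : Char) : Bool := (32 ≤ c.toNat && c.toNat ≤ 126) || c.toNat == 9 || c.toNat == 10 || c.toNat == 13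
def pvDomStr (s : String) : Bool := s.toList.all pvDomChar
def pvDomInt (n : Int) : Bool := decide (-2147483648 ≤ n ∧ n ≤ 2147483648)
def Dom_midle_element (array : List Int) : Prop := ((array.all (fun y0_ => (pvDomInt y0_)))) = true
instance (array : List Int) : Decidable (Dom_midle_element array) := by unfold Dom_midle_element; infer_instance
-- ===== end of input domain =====

-- B is a different algorithm: sort once, test one sorted position — O(n log n) instead of A's nested scans.

-- ===== PORT A =====
-- inner loop: right_pos after scanning array for a fixed f (left_pos is dead in A)
def midleA_inner (f : Int) (arr : List Int) : Int :=
  arr.foldl (fun r i => if f > i then r + 1 else r - 1) 0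

-- outer loop: first f whose right_pos is 1
def midleA_loop (arr : List Int) : List Int → Option Int
  | [] => none
  | f :: rest => if midleA_inner f arr == 1 then some f else midleA_loop arr rest

def midle_element (array : List Int) : Option Int :=
  midleA_loop array array

-- ===== PORT B =====
def midle_element_alt (array : List Int) : Option Int :=
  let n := array.length
  if n % 2 == 0 || n == 1 then none
  else
    let s := PySem.List.sorted array (fun x => x) false
    let t := (n + 1) / 2
    -- Python indexes s[t-1], s[t]; both are in range here (n odd, n ≥ 3)
    match PySem.List.pyGet? s ((t : Int) - 1), PySem.List.pyGet? s (t : Int) with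
    | some a, some b => if a < b then some b else none
    | _, _ => none

-- ===== PRECONDITION & SPEC =====
def Spec_midle_element (array : List Int) (out : Option Int) : Prop := out = midle_element_alt array
instance (array : List Int) (out : Option Int) : Decidable (Spec_midle_element array out) := by unfold Spec_midle_element; infer_instance

-- ===== CLAIM (what is proved, stated in full; the proofs are below) =====
def Claim_equal_midle_element : Prop := ∀ (array : List Int), Dom_midle_element array → Spec_midle_element array (midle_element array)

-- ===== LEMMAS AND PROOFS =====

-- count of strictly smaller elements, as a Nat
def cntLt (v : Int) (l : List Int) : Nat := l.countP (fun i => decide (i < v))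

theorem midleA_inner_foldl (f : Int) (l : List Int) (r : Int) :
    l.foldl (fun r i => if f > i then r + 1 else r - 1) r
      = r + 2 * (cntLt f l : Int) - l.length := by
  induction l generalizing r with
  | nil => simp [cntLt]
  | cons a t ih =>
    simp only [List.foldl_cons, ih, cntLt, List.countP_cons, List.length_cons]
    by_cases h : a < f
    · simp [h, gt_iff_lt]; ring
    · simp [h, gt_iff_lt]; ring

theorem midleA_inner_eq (f : Int) (l : List Int) :
    midleA_inner f l = 2 * (cntLt f l : Int) - l.length := by
  simpa using midleA_inner_foldl f l 0

theorem midleA_loop_eq_find? (arr l : List Int) :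
    midleA_loop arr l = l.find? (fun f => midleA_inner f arr == 1) := by
  induction l with
  | nil => rfl
  | cons a t ih =>
    simp only [midleA_loop, List.find?]
    by_cases h : midleA_inner a arr == 1 <;> simp [h, ih]

-- in a ≤-sorted list, positions strictly below cntLt v are exactly those holding values < v
theorem sorted_countP_lt (s : List Int) (hs : s.Pairwise (· ≤ ·)) (v : Int)
    (j : Nat) (hj : j < s.length) :
    (j < cntLt v s) ↔ s[j] < v := by
  induction s generalizing j with
  | nil => simp at hj
  | cons a t ih =>
    rcases List.pairwise_cons.mp hs with ⟨ha, ht⟩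
    by_cases hav : a < v
    · have hc : cntLt v (a :: t) = cntLt v t + 1 := by
        simp [cntLt, hav]
      cases j with
      | zero => simp [hc, hav]
      | succ k =>
        have hk : k < t.length := by simpa using hj
        have := ih ht k hk
        simp only [hc, List.getElem_cons_succ]
        omega
    · have hct : cntLt v t = 0 := by
        refine List.countP_eq_zero.mpr ?_
        intro x hx
        have := ha x hx
        simp only [decide_eq_true_eq]
        omega
      have hc : cntLt v (a :: t) = 0 := by
        simp only [cntLt, List.countP_cons, decide_eq_true_eq] at hct ⊢
        simp [hav, hct]
      cases j with
      | zero => simp [hc, hav]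
      | succ k =>
        have hk : k < t.length := by simpa using hj
        have hta : a ≤ t[k] := ha _ (List.getElem_mem hk)
        simp only [hc, List.getElem_cons_succ]
        omega

-- monotone access into the sorted list
theorem sorted_mono (s : List Int) (hs : s.Pairwise (· ≤ ·)) {i j : Nat}
    (hij : i ≤ j) (hj : j < s.length) : s[i]'(lt_of_le_of_lt hij hj) ≤ s[j] := by
  rcases Nat.lt_or_ge i j with h | h
  · exact List.pairwise_iff_getElem.mp hs i j _ hj h
  · have : i = j := le_antisymm hij h
    subst this; exact le_refl _

-- any element with exactly (n+1)/2 strictly-smaller elements (n odd) must be s[t], and s[t-1] < s[t]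
theorem witness_char (s : List Int) (hs : s.Pairwise (· ≤ ·)) (t : Nat)
    (ht1 : 1 ≤ t) (ht : t < s.length) (f : Int) (hf : f ∈ s)
    (hc : cntLt f s = t) :
    f = s[t] ∧ s[t-1]'(lt_trans (by omega) ht) < s[t] := by
  have hiff := fun (j : Nat) (hj : j < s.length) => sorted_countP_lt s hs f j hj
  have h1 : ¬ s[t] < f := by
    have := (hiff t ht).not
    simp only [hc] at this
    exact this.mp (by omega)
  obtain ⟨j, hj, hjf⟩ := List.mem_iff_getElem.mp hf
  have hjt : ¬ j < t := by
    intro hjt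
    have := (hiff j hj).mp (by omega)
    simp [hjf] at this
  have h2 : s[t] ≤ f := by
    have := sorted_mono s hs (Nat.le_of_not_lt hjt) hj
    simpa [hjf] using this
  have hft : f = s[t] := le_antisymm (le_of_not_gt h1) h2
  refine ⟨hft, ?_⟩
  have := (hiff (t-1) (by omega)).mpr
  have hlt : s[t-1]'(lt_trans (by omega) ht) < f := (hiff (t-1) (by omega)).mp (by omega)
  simpa [hft] using hlt

-- conversely, if s[t-1] < s[t] then s[t] has exactly t strictly-smaller elements
theorem witness_exists (s : List Int) (hs : s.Pairwise (· ≤ ·)) (t : Nat)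
    (ht1 : 1 ≤ t) (ht : t < s.length)
    (hlt : s[t-1]'(lt_trans (by omega) ht) < s[t]) :
    cntLt (s[t]) s = t := by
  have hiff := fun (j : Nat) (hj : j < s.length) => sorted_countP_lt s hs (s[t]) j hj
  have hge : t ≤ cntLt (s[t]) s := by
    have h1 := (hiff (t-1) (by omega)).mpr hlt
    omega
  have hle : cntLt (s[t]) s ≤ t := by
    by_contra h
    exact absurd ((hiff t ht).mp (by omega)) (lt_irrefl _)
  omega

theorem midle_element_spec : Claim_equal_midle_element := by
  intro array _
  unfold Spec_midle_element midle_element midle_element_alt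
  rw [midleA_loop_eq_find?]
  have hPiff : ∀ f, ((midleA_inner f array == 1) = true) ↔
      2 * cntLt f array = array.length + 1 := by
    intro f
    rw [beq_iff_eq, midleA_inner_eq]
    unfold cntLt
    omega
  set n := array.length with hn
  set s := PySem.List.sorted array (fun x => x) false with hsdef
  have hlen : s.length = n := PySem.List.length_sorted array _ _
  have hs : s.Pairwise (· ≤ ·) := PySem.List.sorted_pairwise array (fun x => x)
  have hperm : s.Perm array := PySem.List.sorted_perm array _ _
  have hcnt : ∀ v, cntLt v s = cntLt v array := fun v => hperm.countP_eq _
  by_cases hpar : (n % 2 == 0 || n == 1) = true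
  · simp only [hpar, if_true]
    rw [List.find?_eq_none]
    intro f hf hPf
    have hP := (hPiff f).mp hPf
    rcases Bool.or_eq_true_iff.mp hpar with he | h1
    · have : n % 2 = 0 := by simpa using he
      omega
    · have hn1 : n = 1 := by simpa using h1
      obtain ⟨a, rfl⟩ := List.length_eq_one_iff.mp hn1
      have : f = a := by simpa using hf
      subst this
      have : cntLt f [f] = 0 := by simp [cntLt]
      rw [hn1] at hP
      omega
  · simp only [hpar]
    have hodd : n % 2 = 1 := by
      rcases Nat.mod_two_eq_zero_or_one n with h | h
      · exact absurd (by simp [h]) hpar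
      · exact h
    have hne1 : n ≠ 1 := by intro h; exact hpar (by simp [h])
    have hn3 : 3 ≤ n := by omega
    set t := (n + 1) / 2 with htdef
    have ht1 : 1 ≤ t := by omega
    have htn : t < n := by omega
    have h2t : 2 * t = n + 1 := by omega
    have htlen : t < s.length := by omega
    have ht1len : t - 1 < s.length := by omega
    have hg1 : PySem.List.pyGet? s ((t : Int) - 1) = some (s[t-1]) := by
      have : ((t : Int) - 1) = ((t - 1 : Nat) : Int) := by omega
      rw [this, PySem.List.pyGet?_natCast]
      simp [ht1len]
    have hg2 : PySem.List.pyGet? s (t : Int) = some (s[t]) := by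
      rw [PySem.List.pyGet?_natCast]
      simp [htlen]
    rw [hg1, hg2]
    by_cases hlt : s[t-1] < s[t]
    · simp only [hlt, if_true]
      have hcP : cntLt (s[t]) array = t := by rw [← hcnt]; exact witness_exists s hs t ht1 htlen hlt
      have hmem : s[t] ∈ array := hperm.mem_iff.mp (List.getElem_mem htlen)
      have hPst : (midleA_inner (s[t]) array == 1) = true := (hPiff _).mpr (by omega)
      have hsome : (array.find? (fun f => midleA_inner f array == 1)).isSome := by
        rw [List.find?_isSome]
        exact ⟨s[t], hmem, hPst⟩
      obtain ⟨a, ha⟩ := Option.isSome_iff_exists.mp hsome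
      have hpa : (fun f => midleA_inner f array == 1) a = true :=
        List.find?_some (p := fun f => midleA_inner f array == 1) ha
      have haP := (hPiff a).mp hpa
      have hamem : a ∈ s := hperm.mem_iff.mpr (List.mem_of_find?_eq_some ha)
      have hca : cntLt a s = t := by rw [hcnt]; omega
      have := (witness_char s hs t ht1 htlen a hamem hca).1
      rw [ha, this]
      simp
    · have hnone : List.find? (fun f => midleA_inner f array == 1) array = none := by
        rw [List.find?_eq_none]
        intro f hf hPf
        have hP := (hPiff f).mp hPf
        have hfs : f ∈ s := hperm.mem_iff.mpr hf
        have hcf : cntLt f s = t := by rw [hcnt]; omega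
        exact hlt (witness_char s hs t ht1 htlen f hfs hcf).2
      rw [hnone]
      simp [hlt]
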